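-- pv_equiv track=rewrite | github.com/WHY-David/moment_compression | moment_matching.py | multi_exponents
-- ===== SOURCE A (Python) =====
-- def multi_exponents(m, k):
--     """
--     Generate all exponent-tuples e = (e_0,...,e_{m-1}) of nonnegative
--     integers with sum(e) <= k, ordered by increasing total degree.
--     The total count is binom(m+k, k).
--     """
--     exps = []
--     def gen(curr, remaining, idx):
--         if idx == m:
--             if remaining == 0:
--                 exps.append(tuple(curr))
--             return
--         if idx == m-1:
--             # last coordinate must absorb all remaining
--             curr.append(remaining)
--             gen(curr, 0, idx+1)
--             curr.pop()
--         else: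
--             for take in range(remaining+1):
--                 curr.append(take)
--                 gen(curr, remaining - take, idx+1)
--                 curr.pop()
--     for total in range(k+1):
--         gen([], total, 0)
--     return exps
-- ===== SOURCE B (Python) =====
-- def multi_exponents(m, k):
--     """Iterative breadth-first expansion: for each total degree, grow
--     partial prefixes level by level instead of recursive backtracking."""
--     exps = []
--     for total in range(k + 1):
--         if m == 0:
--             if total == 0:
--                 exps.append(())
--             continue
--         level = [([], total)]
--         for _ in range(m - 1):
--             level = [(p + [t], r - t) for (p, r) in level for t in range(r + 1)]
--         for p, r in level:
--             exps.append(tuple(p + [r]))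
--     return exps
-- ===== Notes on version B (the rewrite author's own statement) =====
-- stated objective: alternative
-- what changed: Replaces the recursive backtracking generator (mutating curr with append/pop) by an iterative breadth-first expansion: for each total degree a level list of (prefix, remaining) pairs is grown coordinate by coordinate with a comprehension, then finalized; same tuples in the same order.
import Mathlib
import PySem

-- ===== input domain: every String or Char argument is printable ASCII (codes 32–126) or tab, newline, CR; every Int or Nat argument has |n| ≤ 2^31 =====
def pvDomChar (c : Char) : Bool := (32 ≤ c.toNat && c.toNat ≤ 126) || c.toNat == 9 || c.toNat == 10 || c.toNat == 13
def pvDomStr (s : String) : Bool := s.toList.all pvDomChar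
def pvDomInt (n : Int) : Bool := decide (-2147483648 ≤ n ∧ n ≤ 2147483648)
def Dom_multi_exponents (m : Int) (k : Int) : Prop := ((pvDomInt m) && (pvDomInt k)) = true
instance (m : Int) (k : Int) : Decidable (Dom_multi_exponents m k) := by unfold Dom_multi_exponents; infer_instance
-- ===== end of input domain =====

-- B replaces A's recursive backtracking by an iterative level-by-level expansion of
-- prefix/remainder pairs (a genuinely different traversal, same output order).

-- ===== PORT A =====
-- helper gen(curr, remaining, idx): fuel = (m - idx).toNat makes the recursion structural;
-- under Pre_ (0 ≤ m or k < 0) the fuel-0 branch is never reached, so the port is exact there.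
def pvGenA (m : Int) : Nat → List Int → Int → Int → List (List Int) → List (List Int)
  | fuel, curr, remaining, idx, exps =>
    if idx = m then
      (if remaining = 0 then exps ++ [curr] else exps)
    else
      match fuel with
      | 0 => exps
      | fuel' + 1 =>
        if idx = m - 1 then
          pvGenA m fuel' (curr ++ [remaining]) 0 (idx + 1) exps
        else
          (PySem.List.pyRange 0 (remaining + 1) 1).foldl
            (fun acc take => pvGenA m fuel' (curr ++ [take]) (remaining - take) (idx + 1) acc)
            exps

def multi_exponents (m : Int) (k : Int) : List (List Int) :=
  (PySem.List.pyRange 0 (k + 1) 1).foldl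
    (fun exps total => pvGenA m m.toNat [] total 0 exps) []

-- ===== PORT B =====
-- level = [(p + [t], r - t) for (p, r) in level for t in range(r + 1)]
def pvStep (lvl : List (List Int × Int)) : List (List Int × Int) :=
  lvl.flatMap (fun pr =>
    (PySem.List.pyRange 0 (pr.2 + 1) 1).map (fun t => (pr.1 ++ [t], pr.2 - t)))

def multi_exponents_alt (m : Int) (k : Int) : List (List Int) :=
  (PySem.List.pyRange 0 (k + 1) 1).foldl
    (fun exps total =>
      if m = 0 then
        (if total = 0 then exps ++ [[]] else exps)
      else
        let level := (PySem.List.pyRange 0 (m - 1) 1).foldl (fun lvl _ => pvStep lvl)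
          [([], total)]
        exps ++ level.map (fun pr => pr.1 ++ [pr.2]))
    []

-- ===== PRECONDITION & SPEC =====
-- Pre_ excludes exactly the inputs where A raises (RecursionError): m < 0 with k ≥ 0,
-- where gen's idx never reaches m.  It is exactly A's returning domain.
def Pre_multi_exponents (m : Int) (k : Int) : Prop := 0 ≤ m ∨ k < 0
instance (m : Int) (k : Int) : Decidable (Pre_multi_exponents m k) := by
  unfold Pre_multi_exponents; infer_instance

def pvWitness_multi_exponents : Int × Int := (3, 4)

def Spec_multi_exponents (m : Int) (k : Int) (out : List (List Int)) : Prop :=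
  out = multi_exponents_alt m k
instance (m : Int) (k : Int) (out : List (List Int)) : Decidable (Spec_multi_exponents m k out) := by
  unfold Spec_multi_exponents; infer_instance

-- ===== CLAIM (what is proved, stated in full; the proofs are below) =====
def Claim_equal_multi_exponents : Prop :=
  ∀ (m : Int) (k : Int), Dom_multi_exponents m k → Pre_multi_exponents m k →
    Spec_multi_exponents m k (multi_exponents m k)

-- ===== LEMMAS AND PROOFS =====

-- reference description of one degree level: compositions of r into n parts, lex order
def pvComp : Nat → Int → List (List Int)
  | 0, r => if r = 0 then [[]] else []
  | 1, r => [[r]]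
  | n + 2, r =>
    (PySem.List.pyRange 0 (r + 1) 1).flatMap
      (fun t => (pvComp (n + 1) (r - t)).map (fun q => t :: q))

lemma pvFoldl_congr {α β : Type} {f g : α → β → α} {l : List β} {init : α}
    (h : ∀ a b, b ∈ l → f a b = g a b) : l.foldl f init = l.foldl g init := by
  induction l generalizing init with
  | nil => rfl
  | cons x xs ih =>
    simp only [List.foldl_cons]
    rw [h init x (by simp)]
    exact ih (fun a b hb => h a b (by simp [hb]))

lemma pvGenA_spec (m : Int) : ∀ (n : Nat) (curr : List Int) (r idx : Int)
    (exps : List (List Int)), idx + (n : Int) = m →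
    pvGenA m n curr r idx exps = exps ++ (pvComp n r).map (fun q => curr ++ q) := by
  intro n
  induction n with
  | zero =>
    intro curr r idx exps h
    simp only [Nat.cast_zero, add_zero] at h
    subst h
    rw [pvGenA.eq_def]
    simp only [pvComp]
    split_ifs <;> simp
  | succ n ih =>
    intro curr r idx exps h
    have hne : idx ≠ m := by omega
    cases n with
    | zero =>
      have h1 : idx = m - 1 := by omega
      have h2 : idx + 1 = m := by omega
      rw [pvGenA.eq_def]
      simp only [if_neg hne, if_pos h1]
      rw [pvGenA.eq_def]
      simp only [if_pos h2, pvComp]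
      simp
    | succ n' =>
      have h1 : idx ≠ m - 1 := by omega
      rw [pvGenA.eq_def]
      simp only [if_neg hne, if_neg h1]
      have hrec :
          (PySem.List.pyRange 0 (r + 1) 1).foldl
            (fun acc take => pvGenA m (n' + 1) (curr ++ [take]) (r - take) (idx + 1) acc) exps
          = (PySem.List.pyRange 0 (r + 1) 1).foldl
            (fun acc take => acc ++ (pvComp (n' + 1) (r - take)).map
              (fun q => (curr ++ [take]) ++ q)) exps := by
        apply pvFoldl_congr
        intro a b _
        exact ih (curr ++ [b]) (r - b) (idx + 1) a (by push_cast at h ⊢; omega)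
      rw [hrec, PySem.List.foldl_append_eq_flatMap]
      simp only [pvComp, List.map_flatMap]
      congr 1
      congr 1
      funext t
      simp [Function.comp, List.map_map, List.append_assoc]

lemma pvStep_append (a b : List (List Int × Int)) :
    pvStep (a ++ b) = pvStep a ++ pvStep b := by
  simp [pvStep]

lemma pvStep_iterate_flatMap (j : Nat) (l : List (List Int × Int)) :
    pvStep^[j] l = l.flatMap (fun pr => pvStep^[j] [pr]) := by
  induction j generalizing l with
  | zero => simp
  | succ j ih =>
    simp only [Function.iterate_succ_apply]
    rw [ih (pvStep l)]
    induction l with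
    | nil => simp [pvStep]
    | cons x xs ihl =>
      have : pvStep (x :: xs) = pvStep [x] ++ pvStep xs := by
        simpa using pvStep_append [x] xs
      rw [this, List.flatMap_append, ihl]
      simp [← ih (pvStep [x])]

lemma pvStep_iterate_prefix (j : Nat) (p : List Int) (r : Int) :
    pvStep^[j] [(p, r)] = (pvStep^[j] [([], r)]).map (fun pr => (p ++ pr.1, pr.2)) := by
  induction j generalizing p r with
  | zero => simp
  | succ j ih =>
    rw [Function.iterate_succ_apply, Function.iterate_succ_apply]
    have hs : ∀ (q : List Int), pvStep [(q, r)]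
        = (PySem.List.pyRange 0 (r + 1) 1).map (fun t => (q ++ [t], r - t)) := by
      intro q; simp [pvStep]
    rw [hs p, hs []]
    rw [pvStep_iterate_flatMap j, pvStep_iterate_flatMap j
      ((PySem.List.pyRange 0 (r + 1) 1).map (fun t => (([] : List Int) ++ [t], r - t)))]
    simp only [List.flatMap_map, List.map_flatMap]
    congr 1
    funext t
    rw [ih (p ++ [t]) (r - t), ih ([] ++ [t]) (r - t)]
    simp [List.map_map, Function.comp, List.append_assoc]

lemma pvStep_iterate_comp (j : Nat) (r : Int) :
    (pvStep^[j] [([], r)]).map (fun pr => pr.1 ++ [pr.2]) = pvComp (j + 1) r := by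
  induction j generalizing r with
  | zero => simp [pvComp]
  | succ j ih =>
    rw [Function.iterate_succ_apply]
    have hs : pvStep [(([] : List Int), r)]
        = (PySem.List.pyRange 0 (r + 1) 1).map (fun t => ([t], r - t)) := by
      simp [pvStep]
    rw [hs, pvStep_iterate_flatMap j]
    simp only [List.flatMap_map, List.map_flatMap]
    show _ = pvComp (j + 1 + 1) r
    rw [pvComp]
    congr 1
    funext t
    rw [pvStep_iterate_prefix j [t] (r - t)]
    rw [← ih (r - t)]
    simp [List.map_map, Function.comp]

lemma foldl_const_iterate {α β : Type} (f : α → α) (l : List β) (init : α) :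
    l.foldl (fun a _ => f a) init = f^[l.length] init := by
  induction l generalizing init with
  | nil => simp
  | cons x xs ih => simp [ih, Function.iterate_succ_apply]

lemma per_total_eq (m : Int) (hm : 0 ≤ m) (exps : List (List Int)) (total : Int) :
    pvGenA m m.toNat [] total 0 exps
    = if m = 0 then (if total = 0 then exps ++ [[]] else exps)
      else exps ++ ((PySem.List.pyRange 0 (m - 1) 1).foldl (fun lvl _ => pvStep lvl)
          [([], total)]).map (fun pr => pr.1 ++ [pr.2]) := by
  have hA : pvGenA m m.toNat [] total 0 exps = exps ++ pvComp m.toNat total := by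
    rw [pvGenA_spec m m.toNat [] total 0 exps (by omega)]
    simp
  rw [hA]
  by_cases h0 : m = 0
  · subst h0
    rw [if_pos rfl]
    show exps ++ pvComp 0 total = _
    rw [pvComp]
    split_ifs <;> simp
  · rw [if_neg h0]
    rw [foldl_const_iterate, PySem.List.length_pyRange_one]
    rw [pvStep_iterate_comp ((m - 1 - 0).toNat) total]
    congr 2
    omega

-- ===== VERDICT (by name: the statement is the Claim_ definition above) =====
theorem multi_exponents_spec : Claim_equal_multi_exponents := by
  intro m k _ hpre
  unfold Spec_multi_exponents multi_exponents multi_exponents_alt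
  rcases hpre with hm | hk
  · apply pvFoldl_congr
    intro b a _
    exact per_total_eq m hm b a
  · rw [PySem.List.pyRange_one_eq_nil (by omega)]
    simp
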